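-- pv_equiv track=rewrite | github.com/dannynycc/OptionChart | core/taifex_calendar.py | tf_name_label
-- ===== SOURCE A (Python) =====
-- PREFIX_RULES: list[tuple[str, int, int]] = [
--     ("TX1",  1, 2),   # 第1個週三
--     ("TX2",  2, 2),   # 第2個週三
--     ("TXO",  3, 2),   # 第3個週三（月選）
--     ("TX4",  4, 2),   # 第4個週三
--     ("TX5",  5, 2),   # 第5個週三（罕見）
--     ("TXU",  1, 4),   # 第1個週五
--     ("TXV",  2, 4),   # 第2個週五
--     ("TXX",  3, 4),   # 第3個週五
--     ("TXY",  4, 4),   # 第4個週五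
--     ("TXZ",  5, 4),   # 第5個週五（罕見）
-- ]
--
-- def tf_name_label(prefix: str, month: int) -> str:
--     """
--     回傳 XQFAP TF-Name 欄位的系列標籤。
--       週三（非月選）→ '{MM}W{n}'  e.g. '03W4'
--       週五          → '{MM}F{n}'  e.g. '03F4'
--       月選 TXO      → '{MM}'      e.g. '04'
--     """
--     rule = next(((n, wd) for p, n, wd in PREFIX_RULES if p == prefix), None)
--     if rule is None:
--         return f"{month:02d}"
--     n, wd = rule
--     if prefix == "TXO":
--         return f"{month:02d}"
--     elif wd == 2:
--         return f"{month:02d}W{n}"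
--     else:
--         return f"{month:02d}F{n}"
-- ===== SOURCE B (Python) =====
-- # B: one flat table mapping each prefix directly to its final suffix; no scan, no branches.
-- SUFFIX = {
--     "TX1": "W1", "TX2": "W2", "TXO": "", "TX4": "W4", "TX5": "W5",
--     "TXU": "F1", "TXV": "F2", "TXX": "F3", "TXY": "F4", "TXZ": "F5",
-- }
--
-- def tf_name_label(prefix: str, month: int) -> str:
--     return f"{month:02d}" + SUFFIX.get(prefix, "")
-- ===== Notes on version B (the rewrite author's own statement) =====
-- stated objective: simpler
-- what changed: Replaces the linear scan over PREFIX_RULES plus three formatting branches with a single prefix-to-suffix table whose values bake in the W/F/empty logic, so the body is one expression.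
import Mathlib
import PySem

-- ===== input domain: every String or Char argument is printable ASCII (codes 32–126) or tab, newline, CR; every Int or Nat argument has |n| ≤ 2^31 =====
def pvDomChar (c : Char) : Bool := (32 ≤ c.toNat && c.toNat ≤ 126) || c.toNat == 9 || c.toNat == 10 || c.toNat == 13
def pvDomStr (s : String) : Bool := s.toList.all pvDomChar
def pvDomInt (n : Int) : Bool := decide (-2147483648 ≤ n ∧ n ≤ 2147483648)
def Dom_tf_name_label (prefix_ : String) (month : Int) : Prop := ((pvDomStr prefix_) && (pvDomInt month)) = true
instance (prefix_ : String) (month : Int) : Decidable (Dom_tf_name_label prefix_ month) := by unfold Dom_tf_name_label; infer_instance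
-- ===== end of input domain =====

-- B replaces A's rule-table scan and three formatting branches by a direct prefix→suffix table (objective: simpler).

-- f"{m:02d}": str(m) zero-padded on the left to width 2 (shared: both Pythons use the same f-string)
def pvFmt02 (m : Int) : List Char :=
  let s := PySem.Int.toChars m
  if s.length < 2 then '0' :: s else s

-- ===== PORT A =====
def pvPREFIX_RULES : List (String × Int × Int) :=
  [("TX1", 1, 2), ("TX2", 2, 2), ("TXO", 3, 2), ("TX4", 4, 2), ("TX5", 5, 2),
   ("TXU", 1, 4), ("TXV", 2, 4), ("TXX", 3, 4), ("TXY", 4, 4), ("TXZ", 5, 4)]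

def tf_name_label (prefix_ : String) (month : Int) : String :=
  match (pvPREFIX_RULES.find? (fun t => t.1 == prefix_)).map (fun t => (t.2.1, t.2.2)) with
  | none => String.mk (pvFmt02 month)
  | some (n, wd) =>
    if prefix_ == "TXO" then String.mk (pvFmt02 month)
    else if wd == 2 then String.mk (pvFmt02 month ++ 'W' :: PySem.Int.toChars n)
    else String.mk (pvFmt02 month ++ 'F' :: PySem.Int.toChars n)

-- ===== PORT B =====
def pvSUFFIX : PySem.Dict String String :=
  PySem.Dict.ofList
    [("TX1", "W1"), ("TX2", "W2"), ("TXO", ""), ("TX4", "W4"), ("TX5", "W5"),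
     ("TXU", "F1"), ("TXV", "F2"), ("TXX", "F3"), ("TXY", "F4"), ("TXZ", "F5")]

def tf_name_label_alt (prefix_ : String) (month : Int) : String :=
  String.mk (pvFmt02 month ++ (pvSUFFIX.getD prefix_ "").toList)

-- ===== PRECONDITION & SPEC =====
def Spec_tf_name_label (prefix_ : String) (month : Int) (out : String) : Prop := out = tf_name_label_alt prefix_ month
instance (prefix_ : String) (month : Int) (out : String) : Decidable (Spec_tf_name_label prefix_ month out) := by unfold Spec_tf_name_label; infer_instance

-- ===== CLAIM (what is proved, stated in full; the proofs are below) =====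
def Claim_equal_tf_name_label : Prop := ∀ (prefix_ : String) (month : Int), Dom_tf_name_label prefix_ month → Spec_tf_name_label prefix_ month (tf_name_label prefix_ month)

-- ===== LEMMAS AND PROOFS =====

-- ===== VERDICT (by name: the statement is the Claim_ definition above) =====
theorem tf_name_label_spec : Claim_equal_tf_name_label := by
  intro p m _
  unfold Spec_tf_name_label
  by_cases h1 : "TX1" = p
  · subst h1; rfl
  by_cases h2 : "TX2" = p
  · subst h2; rfl
  by_cases h3 : "TXO" = p
  · subst h3
    have hz : (pvSUFFIX.getD "TXO" "").toList = [] := by decide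
    simp [tf_name_label, tf_name_label_alt, pvPREFIX_RULES, List.find?, hz]
  by_cases h4 : "TX4" = p
  · subst h4; rfl
  by_cases h5 : "TX5" = p
  · subst h5; rfl
  by_cases h6 : "TXU" = p
  · subst h6; rfl
  by_cases h7 : "TXV" = p
  · subst h7; rfl
  by_cases h8 : "TXX" = p
  · subst h8; rfl
  by_cases h9 : "TXY" = p
  · subst h9; rfl
  by_cases h10 : "TXZ" = p
  · subst h10; rfl
  have e1 : ("TX1" == p) = false := beq_eq_false_iff_ne.mpr h1
  have e2 : ("TX2" == p) = false := beq_eq_false_iff_ne.mpr h2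
  have e3 : ("TXO" == p) = false := beq_eq_false_iff_ne.mpr h3
  have e4 : ("TX4" == p) = false := beq_eq_false_iff_ne.mpr h4
  have e5 : ("TX5" == p) = false := beq_eq_false_iff_ne.mpr h5
  have e6 : ("TXU" == p) = false := beq_eq_false_iff_ne.mpr h6
  have e7 : ("TXV" == p) = false := beq_eq_false_iff_ne.mpr h7
  have e8 : ("TXX" == p) = false := beq_eq_false_iff_ne.mpr h8
  have e9 : ("TXY" == p) = false := beq_eq_false_iff_ne.mpr h9
  have e10 : ("TXZ" == p) = false := beq_eq_false_iff_ne.mpr h10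
  have hS : pvSUFFIX = PySem.Dict.mk
      [("TX1", "W1"), ("TX2", "W2"), ("TXO", ""), ("TX4", "W4"), ("TX5", "W5"),
       ("TXU", "F1"), ("TXV", "F2"), ("TXX", "F3"), ("TXY", "F4"), ("TXZ", "F5")] := by rfl
  simp [tf_name_label, tf_name_label_alt, pvPREFIX_RULES, List.find?, hS,
    PySem.Dict.getD, PySem.Dict.get?,
    e1, e2, e3, e4, e5, e6, e7, e8, e9, e10]
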